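-- pv_equiv track=rewrite | github.com/michaelbrewerdavis/advent2024 | day8.py | antinodes2
-- ===== SOURCE A (Python) =====
-- import math
-- import itertools
--
-- def validForMap(map, node):
--     x, y = node
--     return x >= 0 and x < len(map[0]) and y >= 0 and y < len(map)
--
-- def antinodes2(map, node1, node2):
--     dx = node1[0] - node2[0]
--     dy = node1[1] - node2[1]
--     gcd = math.gcd(dx, dy)
--     dx = int(dx / gcd)
--     dy = int(dy / gcd)
--
--     antinodes = set()
--     for i in itertools.count():
--         pt = (node1[0] + i * dx, node1[1] + i * dy)
--         if validForMap(map, pt):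
--             antinodes.add(pt)
--         else:
--             break
--     for i in itertools.count():
--         pt = (node1[0] - i * dx, node1[1] - i * dy)
--         if validForMap(map, pt):
--             antinodes.add(pt)
--         else:
--             break
--     return antinodes
-- ===== SOURCE B (Python) =====
-- import math
--
-- def antinodes2(map, node1, node2):
--     dx = node1[0] - node2[0]
--     dy = node1[1] - node2[1]
--     g = math.gcd(dx, dy)
--     dx //= g
--     dy //= g
--     w = len(map[0])
--     h = len(map)
--     x0, y0 = node1
--     if not (0 <= x0 < w and 0 <= y0 < h):
--         return set()
--
--     def reach(c, step, limit):
--         # largest i >= 0 with 0 <= c + i*step < limit, or None if unbounded (step == 0)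
--         if step > 0:
--             return (limit - 1 - c) // step
--         if step < 0:
--             return c // (-step)
--         return None
--
--     fwd = min(r for r in (reach(x0, dx, w), reach(y0, dy, h)) if r is not None)
--     bwd = min(r for r in (reach(x0, -dx, w), reach(y0, -dy, h)) if r is not None)
--     pts = [(x0 + i * dx, y0 + i * dy) for i in range(fwd + 1)]
--     pts += [(x0 - i * dx, y0 - i * dy) for i in range(1, bwd + 1)]
--     return set(pts)
-- ===== Notes on version B (the rewrite author's own statement) =====
-- stated objective: alternative
-- what changed: Instead of walking the line point by point in two unbounded validity-checked loops until a point falls off the map, B solves the in-bounds inequalities with floor division to get the forward and backward index limits directly and builds the point set from two ranges.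
-- outside the precondition, e.g. on antinodes2([], (-1, 0), (0, 1)): A returns set(), B raises IndexError
import Mathlib
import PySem

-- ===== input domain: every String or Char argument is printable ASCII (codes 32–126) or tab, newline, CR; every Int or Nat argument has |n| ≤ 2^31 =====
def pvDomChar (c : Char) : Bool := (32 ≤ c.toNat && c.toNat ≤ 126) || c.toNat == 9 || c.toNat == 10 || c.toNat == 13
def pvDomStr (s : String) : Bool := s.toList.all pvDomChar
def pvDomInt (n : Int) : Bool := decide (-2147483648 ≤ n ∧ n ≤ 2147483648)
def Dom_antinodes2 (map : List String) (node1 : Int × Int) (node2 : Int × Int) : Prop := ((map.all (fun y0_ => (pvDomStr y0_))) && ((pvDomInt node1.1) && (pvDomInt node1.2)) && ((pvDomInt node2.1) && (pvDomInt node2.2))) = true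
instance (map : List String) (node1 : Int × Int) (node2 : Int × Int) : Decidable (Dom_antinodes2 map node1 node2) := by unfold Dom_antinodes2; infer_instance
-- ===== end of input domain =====

-- B replaces A's two step-by-step walks off the map by directly computing the forward/backward
-- index limits with floor division and materialising the two ranges of points (alternative algorithm).


-- ===== PORT A =====
-- validForMap; map[0] is exact for map ≠ [] (Pre_); Python short-circuits, so on map = [] with x < 0 it
-- returns False without raising — those inputs are excluded by Pre_ anyway.
def pvValidForMap (map : List String) (node : Int × Int) : Bool :=
  decide (node.1 ≥ 0) && decide (node.1 < PySem.Str.len (map.headD ""))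
    && decide (node.2 ≥ 0) && decide (node.2 < (map.length : Int))

-- Python's loop is 'for i in itertools.count(): … else break', unbounded; this fuel is a provable upper
-- bound on its iterations whenever (dx,dy) ≠ (0,0) (see pvLoopA_eq/pvReach_lt below), so the port computes
-- exactly what the Python loop computes on every input Pre_ admits.
def pvFuelA (map : List String) : Nat :=
  (PySem.Str.len (map.headD "")).toNat + map.length + 2

def pvLoopA (map : List String) (x0 y0 dx dy : Int) :
    Nat → Int → PySem.Set (Int × Int) → PySem.Set (Int × Int)
  | 0, _, acc => acc
  | fuel+1, i, acc =>
    let pt := (x0 + i * dx, y0 + i * dy)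
    if pvValidForMap map pt then
      pvLoopA map x0 y0 dx dy fuel (i + 1) (PySem.Set.add acc pt)
    else acc

def antinodes2 (map : List String) (node1 : Int × Int) (node2 : Int × Int) : List (Int × Int) :=
  let dx0 := node1.1 - node2.1
  let dy0 := node1.2 - node2.2
  let g : Int := (Int.gcd dx0 dy0 : Int)   -- math.gcd is nonnegative
  -- int(dx / gcd): exact on Dom (gcd divides dx, |dx| ≤ 2^32 < 2^53, so the float division is exact);
  -- gcd = 0 (node1 = node2) raises ZeroDivisionError in Python and is excluded by Pre_.
  let dx := PySem.Int.floordiv dx0 g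
  let dy := PySem.Int.floordiv dy0 g
  let s1 := pvLoopA map node1.1 node1.2 dx dy (pvFuelA map) 0 PySem.Set.empty
  pvLoopA map node1.1 node1.2 (-dx) (-dy) (pvFuelA map) 0 s1

-- ===== PORT B =====
-- largest i ≥ 0 with 0 ≤ c + i*step < limit (given 0 ≤ c < limit), none when step = 0 (unbounded)
def pvReach (c step limit : Int) : Option Int :=
  if step > 0 then some (PySem.Int.floordiv (limit - 1 - c) step)
  else if step < 0 then some (PySem.Int.floordiv c (-step))
  else none

-- min of the generator over the non-None reaches; both None means Python's min() raises on an empty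
-- generator — impossible under Pre_ (dx, dy not both 0), the 0 is an arbitrary total-function value.
def pvMinSome : Option Int → Option Int → Int
  | some a, some b => min a b
  | some a, none   => a
  | none,   some b => b
  | none,   none   => 0

def antinodes2_alt (map : List String) (node1 : Int × Int) (node2 : Int × Int) : List (Int × Int) :=
  let dx0 := node1.1 - node2.1
  let dy0 := node1.2 - node2.2
  let g : Int := (Int.gcd dx0 dy0 : Int)
  let dx := PySem.Int.floordiv dx0 g      -- Source B: dx //= g (exact, g divides dx)
  let dy := PySem.Int.floordiv dy0 g
  let w := PySem.Str.len (map.headD "")   -- len(map[0]); map ≠ [] by Pre_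
  let h : Int := (map.length : Int)
  let x0 := node1.1
  let y0 := node1.2
  if ¬ (0 ≤ x0 ∧ x0 < w ∧ 0 ≤ y0 ∧ y0 < h) then PySem.Set.empty
  else
    let fwd := pvMinSome (pvReach x0 dx w) (pvReach y0 dy h)
    let bwd := pvMinSome (pvReach x0 (-dx) w) (pvReach y0 (-dy) h)
    let pts := (PySem.List.pyRange 0 (fwd + 1) 1).map (fun i => (x0 + i * dx, y0 + i * dy))
            ++ (PySem.List.pyRange 1 (bwd + 1) 1).map (fun i => (x0 - i * dx, y0 - i * dy))
    PySem.Set.ofList pts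

-- ===== PRECONDITION & SPEC =====
-- Pre_ excludes node1 = node2 (Python's int(dx/gcd) raises ZeroDivisionError) and empty maps, where
-- len(map[0]) raises IndexError as soon as a nonnegative x-coordinate is probed (when node1's x is
-- negative A happens to return the empty set by short-circuiting, an artefact of the and-order; B's
-- unconditional len(map[0]) raises there).
def Pre_antinodes2 (map : List String) (node1 : Int × Int) (node2 : Int × Int) : Prop :=
  map ≠ [] ∧ node1 ≠ node2
instance (map : List String) (node1 : Int × Int) (node2 : Int × Int) : Decidable (Pre_antinodes2 map node1 node2) := by unfold Pre_antinodes2; infer_instance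

def pvWitness_antinodes2 : List String × (Int × Int) × (Int × Int) := (["...", "..."], (0, 0), (1, 1))

def Spec_antinodes2 (map : List String) (node1 : Int × Int) (node2 : Int × Int) (out : List (Int × Int)) : Prop := out = antinodes2_alt map node1 node2
instance (map : List String) (node1 : Int × Int) (node2 : Int × Int) (out : List (Int × Int)) : Decidable (Spec_antinodes2 map node1 node2 out) := by unfold Spec_antinodes2; infer_instance

-- ===== CLAIM (what is proved, stated in full; the proofs are below) =====
def Claim_equal_antinodes2 : Prop := ∀ (map : List String) (node1 : Int × Int) (node2 : Int × Int), Dom_antinodes2 map node1 node2 → Pre_antinodes2 map node1 node2 → Spec_antinodes2 map node1 node2 (antinodes2 map node1 node2)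

-- ===== LEMMAS AND PROOFS =====

-- one coordinate: for i ≥ 0, staying in [0, limit) is exactly 'i ≤ the reach' (vacuous when step = 0)
theorem pvCoord_iff (c step limit i : Int) (h0 : 0 ≤ c) (h1 : c < limit) (hi : 0 ≤ i) :
    ((0 ≤ c + i * step ∧ c + i * step < limit) ↔
      (∀ r, pvReach c step limit = some r → i ≤ r)) := by
  unfold pvReach
  rcases lt_trichotomy step 0 with hs | hs | hs
  · rw [if_neg (show ¬ step > 0 by omega), if_pos (show step < 0 from hs)]
    have hdiv : i ≤ PySem.Int.floordiv c (-step) ↔ i * (-step) ≤ c :=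
      PySem.Int.le_floordiv_iff_mul_le (by omega)
    constructor
    · rintro ⟨hlo, _⟩ r hr
      injection hr with hr; subst hr
      rw [hdiv]; nlinarith
    · intro h
      have := h _ rfl
      rw [hdiv] at this
      constructor
      · nlinarith
      · nlinarith [mul_nonpos_of_nonneg_of_nonpos hi (le_of_lt hs)]
  · rw [if_neg (show ¬ step > 0 by omega), if_neg (show ¬ step < 0 by omega)]
    constructor
    · intro _ r hr; cases hr
    · intro _
      rw [hs, mul_zero, add_zero]
      exact ⟨h0, h1⟩
  · rw [if_pos (show step > 0 from hs)]
    have hdiv : i ≤ PySem.Int.floordiv (limit - 1 - c) step ↔ i * step ≤ limit - 1 - c :=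
      PySem.Int.le_floordiv_iff_mul_le hs
    constructor
    · rintro ⟨_, hhi⟩ r hr
      injection hr with hr; subst hr
      rw [hdiv]; nlinarith
    · intro h
      have := h _ rfl
      rw [hdiv] at this
      constructor
      · nlinarith [mul_nonneg hi (le_of_lt hs)]
      · nlinarith

-- the reach is bounded by its limit (used for fuel sufficiency)
theorem pvReach_lt (c step limit r : Int) (h0 : 0 ≤ c) (h1 : c < limit)
    (hr : pvReach c step limit = some r) : r < limit := by
  unfold pvReach at hr
  rcases lt_trichotomy step 0 with hs | hs | hs
  · rw [if_neg (by omega), if_pos hs] at hr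
    injection hr with hr; subst hr
    calc PySem.Int.floordiv c (-step)
        = c / (-step) := PySem.Int.floordiv_eq_ediv_of_pos (by omega)
      _ ≤ c := Int.ediv_le_self _ h0
      _ < limit := h1
  · rw [if_neg (by omega), if_neg (by omega)] at hr; cases hr
  · rw [if_pos hs] at hr
    injection hr with hr; subst hr
    calc PySem.Int.floordiv (limit - 1 - c) step
        = (limit - 1 - c) / step := PySem.Int.floordiv_eq_ediv_of_pos hs
      _ ≤ limit - 1 - c := Int.ediv_le_self _ (by omega)
      _ < limit := by omega

-- boolean validity as a linear proposition
theorem pvValidForMap_iff (map : List String) (pt : Int × Int) :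
    pvValidForMap map pt = true ↔
      (0 ≤ pt.1 ∧ pt.1 < PySem.Str.len (map.headD "") ∧ 0 ≤ pt.2 ∧ pt.2 < (map.length : Int)) := by
  simp only [pvValidForMap, Bool.and_eq_true, decide_eq_true_eq, ge_iff_le]
  tauto

-- a reach is none only for a zero step
theorem pvReach_eq_none (c step limit : Int) (h : pvReach c step limit = none) : step = 0 := by
  unfold pvReach at h
  by_contra hc
  rcases lt_or_gt_of_ne hc with h1 | h1
  · rw [if_neg (show ¬ step > 0 by omega), if_pos (show step < 0 from h1)] at h; cases h
  · rw [if_pos (show step > 0 from h1)] at h; cases h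

-- validity along the line, for the whole point, as 'i ≤ F'
theorem pvValid_iff (map : List String) (x0 y0 dx dy : Int)
    (hnz : ¬ (dx = 0 ∧ dy = 0))
    (hin : 0 ≤ x0 ∧ x0 < PySem.Str.len (map.headD "") ∧ 0 ≤ y0 ∧ y0 < (map.length : Int))
    (i : Int) (hi : 0 ≤ i) :
    (pvValidForMap map (x0 + i * dx, y0 + i * dy) = true ↔
      i ≤ pvMinSome (pvReach x0 dx (PySem.Str.len (map.headD "")))
                    (pvReach y0 dy (map.length : Int))) := by
  obtain ⟨hx0, hxw, hy0, hyh⟩ := hin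
  have hx := pvCoord_iff x0 dx (PySem.Str.len (map.headD "")) i hx0 hxw hi
  have hy := pvCoord_iff y0 dy ((map.length : Int)) i hy0 hyh hi
  have hvf := pvValidForMap_iff map (x0 + i * dx, y0 + i * dy)
  rw [hvf]
  rw [show (0 ≤ x0 + i * dx ∧ x0 + i * dx < PySem.Str.len (map.headD "") ∧
        0 ≤ y0 + i * dy ∧ y0 + i * dy < (map.length : Int)) ↔
      ((0 ≤ x0 + i * dx ∧ x0 + i * dx < PySem.Str.len (map.headD "")) ∧
       (0 ≤ y0 + i * dy ∧ y0 + i * dy < (map.length : Int))) from by tauto, hx, hy]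
  rcases hrx : pvReach x0 dx (PySem.Str.len (map.headD "")) with _ | rx <;>
    rcases hry : pvReach y0 dy ((map.length : Int)) with _ | ry
  · exact absurd ⟨pvReach_eq_none _ _ _ hrx, pvReach_eq_none _ _ _ hry⟩ hnz
  · simp [pvMinSome]
  · simp [pvMinSome]
  · simp [pvMinSome]

-- A's walk, given the interval characterisation, is an update with the mapped range
theorem pvLoopA_eq (map : List String) (x0 y0 dx dy F : Int)
    (hvalid : ∀ i : Int, 0 ≤ i → (pvValidForMap map (x0 + i * dx, y0 + i * dy) = true ↔ i ≤ F)) :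
    ∀ (fuel : Nat) (i : Int) (acc : PySem.Set (Int × Int)), 0 ≤ i → (F + 1 - i).toNat < fuel →
      pvLoopA map x0 y0 dx dy fuel i acc
        = PySem.Set.update acc
            ((PySem.List.pyRange i (F + 1) 1).map (fun j => (x0 + j * dx, y0 + j * dy))) := by
  intro fuel
  induction fuel with
  | zero => intro i acc _ hf; omega
  | succ fuel ih =>
    intro i acc hi hf
    show (if pvValidForMap map (x0 + i * dx, y0 + i * dy) then
            pvLoopA map x0 y0 dx dy fuel (i + 1) (PySem.Set.add acc (x0 + i * dx, y0 + i * dy))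
          else acc) = _
    by_cases hv : pvValidForMap map (x0 + i * dx, y0 + i * dy) = true
    · have hle : i ≤ F := (hvalid i hi).mp hv
      rw [if_pos hv, ih (i + 1) _ (by omega) (by omega),
        PySem.List.pyRange_one_cons (by omega : i < F + 1)]
      simp [PySem.Set.update_cons]
    · have hgt : ¬ i ≤ F := fun h => hv ((hvalid i hi).mpr h)
      rw [if_neg hv, PySem.List.pyRange_one_eq_nil (by omega)]
      simp [PySem.Set.update]

-- when the start point is already off the map the walk stops at once
theorem pvLoopA_stop (map : List String) (x0 y0 dx dy : Int) (fuel : Nat)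
    (acc : PySem.Set (Int × Int)) (hf : fuel ≠ 0)
    (hv : ¬ pvValidForMap map (x0 + 0 * dx, y0 + 0 * dy) = true) :
    pvLoopA map x0 y0 dx dy fuel 0 acc = acc := by
  cases fuel with
  | zero => omega
  | succ fuel => exact if_neg hv

-- ===== VERDICT (by name: the statement is the Claim_ definition above) =====
theorem antinodes2_spec : Claim_equal_antinodes2 := by
  intro map node1 node2 _ hpre
  obtain ⟨hmap, hne⟩ := hpre
  unfold Spec_antinodes2
  simp only [antinodes2, antinodes2_alt]
  set dx0 := node1.1 - node2.1 with hdx0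
  set dy0 := node1.2 - node2.2 with hdy0
  set g : Int := (Int.gcd dx0 dy0 : Int) with hg
  set dx := PySem.Int.floordiv dx0 g with hdx
  set dy := PySem.Int.floordiv dy0 g with hdy
  set w := PySem.Str.len (map.headD "") with hw
  set h : Int := (map.length : Int) with hh
  set x0 := node1.1
  set y0 := node1.2
  -- (dx, dy) ≠ (0, 0)
  have hne0 : ¬ (dx0 = 0 ∧ dy0 = 0) := by
    rintro ⟨h1, h2⟩
    exact hne (Prod.ext (by omega) (by omega))
  have hgne : Int.gcd dx0 dy0 ≠ 0 := by
    intro hc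
    exact hne0 ⟨(Int.gcd_eq_zero_iff.mp hc).1, (Int.gcd_eq_zero_iff.mp hc).2⟩
  have hgpos : 0 < g := by
    rw [hg]; exact_mod_cast Nat.pos_of_ne_zero hgne
  have hdvdx : g ∣ dx0 := by rw [hg]; exact Int.gcd_dvd_left dx0 dy0
  have hdvdy : g ∣ dy0 := by rw [hg]; exact Int.gcd_dvd_right dx0 dy0
  have hdx' : dx = dx0 / g := by rw [hdx, PySem.Int.floordiv_eq_ediv_of_pos hgpos]
  have hdy' : dy = dy0 / g := by rw [hdy, PySem.Int.floordiv_eq_ediv_of_pos hgpos]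
  have hnz : ¬ (dx = 0 ∧ dy = 0) := by
    rintro ⟨h1, h2⟩
    apply hne0
    constructor
    · have := Int.ediv_mul_cancel hdvdx
      rw [← hdx', h1] at this; simpa using this.symm
    · have := Int.ediv_mul_cancel hdvdy
      rw [← hdy', h2] at this; simpa using this.symm
  have hnz' : ¬ (-dx = 0 ∧ -dy = 0) := by
    rintro ⟨h1, h2⟩; exact hnz ⟨by omega, by omega⟩
  by_cases hin : 0 ≤ x0 ∧ x0 < w ∧ 0 ≤ y0 ∧ y0 < h
  · -- start point on the map
    obtain ⟨hx0, hxw, hy0, hyh⟩ := hin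
    rw [if_neg (not_not_intro ⟨hx0, hxw, hy0, hyh⟩)]
    set F := pvMinSome (pvReach x0 dx w) (pvReach y0 dy h) with hF
    set Bk := pvMinSome (pvReach x0 (-dx) w) (pvReach y0 (-dy) h) with hBk
    have hvF := pvValid_iff map x0 y0 dx dy hnz ⟨hx0, hxw, hy0, hyh⟩
    have hvB := pvValid_iff map x0 y0 (-dx) (-dy) hnz' ⟨hx0, hxw, hy0, hyh⟩
    have hv0 : ∀ a b : Int, pvValidForMap map (x0 + 0 * a, y0 + 0 * b) = true := by
      intro a b
      rw [pvValidForMap_iff]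
      exact ⟨by omega, by omega, by omega, by omega⟩
    have hF0 : 0 ≤ F := (hvF 0 le_rfl).mp (hv0 dx dy)
    have hB0 : 0 ≤ Bk := (hvB 0 le_rfl).mp (hv0 (-dx) (-dy))
    -- fuel bounds: every reach is < w + h, hence so are F and Bk
    have hbound : ∀ a b : Int, pvMinSome (pvReach x0 a w) (pvReach y0 b h) < w + h := by
      intro a b
      rcases hra : pvReach x0 a w with _ | ra <;> rcases hrb : pvReach y0 b h with _ | rb
      · simp [pvMinSome]; omega
      · have := pvReach_lt y0 b h rb hy0 hyh hrb; simp [pvMinSome]; omega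
      · have := pvReach_lt x0 a w ra hx0 hxw hra; simp [pvMinSome]; omega
      · have h1 := pvReach_lt x0 a w ra hx0 hxw hra
        simp [pvMinSome]; left; omega
    have hFw : F < w + h := hbound dx dy
    have hBw : Bk < w + h := hbound (-dx) (-dy)
    have hfuel : pvFuelA map = w.toNat + map.length + 2 := rfl
    have hwnn : 0 ≤ w := by omega
    rw [pvLoopA_eq map x0 y0 dx dy F hvF (pvFuelA map) 0 PySem.Set.empty le_rfl
        (by rw [hfuel]; omega),
      pvLoopA_eq map x0 y0 (-dx) (-dy) Bk hvB (pvFuelA map) 0 _ le_rfl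
        (by rw [hfuel]; omega)]
    -- split the backward range at its head 0 (a duplicate of the forward head)
    rw [PySem.List.pyRange_one_cons (by omega : (0:Int) < Bk + 1)]
    have hmemF : (x0 + 0 * dx, y0 + 0 * dy) ∈
        PySem.Set.update PySem.Set.empty
          ((PySem.List.pyRange 0 (F + 1) 1).map (fun j => (x0 + j * dx, y0 + j * dy))) := by
      rw [PySem.Set.mem_update]
      right
      exact List.mem_map.mpr ⟨0, PySem.List.mem_pyRange_one.mpr ⟨le_rfl, by omega⟩, rfl⟩
    rw [List.map_cons, PySem.Set.update_cons,
      PySem.Set.add_of_mem (by simpa using hmemF)]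
    have hfun : (fun j : Int => (x0 + j * -dx, y0 + j * -dy))
        = fun j : Int => (x0 - j * dx, y0 - j * dy) := by
      funext j; simp [Prod.ext_iff]; constructor <;> ring
    rw [PySem.Set.ofList_append, PySem.Set.update_empty, hfun]
    norm_num
  · -- start point off the map: both walks break at i = 0, B returns the empty set
    rw [if_pos (by tauto)]
    have hv : ∀ a b : Int, ¬ pvValidForMap map (x0 + 0 * a, y0 + 0 * b) = true := by
      intro a b hc
      rw [pvValidForMap_iff] at hc
      exact hin ⟨by omega, by omega, by omega, by omega⟩
    rw [pvLoopA_stop map x0 y0 dx dy (pvFuelA map) PySem.Set.empty (by simp [pvFuelA]) (hv dx dy),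
      pvLoopA_stop map x0 y0 (-dx) (-dy) (pvFuelA map) PySem.Set.empty (by simp [pvFuelA]) (hv (-dx) (-dy))]
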